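-- pv_equiv track=rewrite | github.com/sharkblue-LS/PythonProjects | venv/Lib/site-packages/eric6/QScintilla/DocstringGenerator/PyDocstringGenerator.py | __findQuotePosition
-- ===== SOURCE A (Python) =====
-- def __findQuotePosition(text):
--     """
--     Private method to find the start and end position of pairs of quotes.
--
--     @param text text to be parsed
--     @type str
--     @return list of tuple with start and end position of pairs of quotes
--     @rtype list of tuple of (int, int)
--     @exception IndexError raised when a matching close quote is missing
--     """
--     pos = []
--     foundLeftQuote = False
--
--     for index, character in enumerate(text):
--         if foundLeftQuote is False:
--             if character == "'" or character == '"':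
--                 foundLeftQuote = True
--                 quote = character
--                 leftPos = index
--         else:
--             if character == quote and text[index - 1] != "\\":
--                 pos.append((leftPos, index))
--                 foundLeftQuote = False
--
--     if foundLeftQuote:
--         raise IndexError("No matching close quote at: {0}".format(leftPos))
--
--     return pos
-- ===== SOURCE B (Python) =====
-- def __findQuotePosition(text):
--     """Cursor-based re-implementation: jump between quotes with str.find
--     instead of a char-by-char state machine."""
--     pos = []
--     i = 0
--     n = len(text)
--     while i < n:
--         character = text[i]
--         if character == "'" or character == '"':
--             leftPos = i
--             k = i + 1
--             while True:
--                 k = text.find(character, k)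
--                 if k == -1:
--                     raise IndexError(
--                         "No matching close quote at: {0}".format(leftPos))
--                 if text[k - 1] == "\\":
--                     k += 1
--                 else:
--                     break
--             pos.append((leftPos, k))
--             i = k + 1
--         else:
--             i += 1
--     return pos
-- ===== Notes on version B (the rewrite author's own statement) =====
-- stated objective: alternative
-- what changed: Replaces the single enumerate pass with a boolean in-quote state machine by an outer cursor that skips to the next opening quote and an inner str.find jump to the next unescaped closing quote.
import Mathlib
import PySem

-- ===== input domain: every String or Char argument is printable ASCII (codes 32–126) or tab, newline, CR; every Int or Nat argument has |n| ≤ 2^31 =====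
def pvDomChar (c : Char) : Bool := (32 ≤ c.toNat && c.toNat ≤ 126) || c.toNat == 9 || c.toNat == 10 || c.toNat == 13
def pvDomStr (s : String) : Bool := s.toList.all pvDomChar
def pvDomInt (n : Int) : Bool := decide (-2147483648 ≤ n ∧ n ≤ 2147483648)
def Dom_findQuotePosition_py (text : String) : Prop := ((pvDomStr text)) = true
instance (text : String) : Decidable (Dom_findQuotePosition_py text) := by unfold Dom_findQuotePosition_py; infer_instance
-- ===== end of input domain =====

-- B replaces A's char-by-char boolean-state scan by an outer cursor plus str.find jumps
-- to the next unescaped closing quote (alternative decomposition, same return values).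


-- ===== PORT A =====
-- one step of A's for-loop: state = (pos, foundLeftQuote as Option (quote, leftPos))
def stepA (cs : List Char) (st : List (Int × Int) × Option (Char × Int)) (p : Int × Char) :
    List (Int × Int) × Option (Char × Int) :=
  match st.2 with
  | none => if p.2 = '\'' ∨ p.2 = '"' then (st.1, some (p.2, p.1)) else st
  | some (q, lp) =>
      if p.2 = q ∧ PySem.List.pyGet? cs (p.1 - 1) ≠ some '\\' then (st.1 ++ [(lp, p.1)], none)
      else st

-- on an unmatched left quote Python A raises IndexError (excluded by Pre_); the port returns pos there
def findQuotePosition_py (text : String) : List (Int × Int) :=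
  ((PySem.List.enumerate text.toList 0).foldl (stepA text.toList) ([], none)).1

-- ===== PORT B =====
-- inner `while True` loop of B: text.find(quote, k), skip escaped closes; none = the raise
-- branch. The fuel argument only makes the loop total: cs.length + 1 steps always suffice.
def findCloseB (cs : List Char) (q : Char) : Nat → Nat → Option Nat
  | 0, _ => none
  | fuel+1, k =>
      let j := PySem.Chars.findFrom cs [q] (k:Int) none
      if j = -1 then none
      else if PySem.List.pyGet? cs (j - 1) = some '\\' then findCloseB cs q fuel (j.toNat + 1)
      else some j.toNat

-- outer `while i < n` loop of B; on Python's raise branch the port returns []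
def loopB (cs : List Char) : Nat → Nat → List (Int × Int)
  | 0, _ => []
  | fuel+1, i =>
      if h : i < cs.length then
        if cs[i] = '\'' ∨ cs[i] = '"' then
          match findCloseB cs cs[i] (cs.length + 1) (i+1) with
          | none => []
          | some k => ((i:Int), (k:Int)) :: loopB cs fuel (k+1)
        else loopB cs fuel (i+1)
      else []

def findQuotePosition_py_alt (text : String) : List (Int × Int) :=
  loopB text.toList (text.toList.length + 1) 0

-- ===== PRECONDITION & SPEC =====
-- Pre_ excludes exactly the inputs with an unmatched left quote, on which Python A (and
-- Python B) raises IndexError instead of returning.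
def quoteState (cs : List Char) : Option Char :=
  (cs.foldl (fun (st : Option Char × Option Char) c =>
      match st.1 with
      | none => (if c = '\'' ∨ c = '"' then some c else none, some c)
      | some q => (if c = q ∧ st.2 ≠ some '\\' then none else some q, some c))
    (none, none)).1

def Pre_findQuotePosition_py (text : String) : Prop := quoteState text.toList = none
instance (text : String) : Decidable (Pre_findQuotePosition_py text) := by
  unfold Pre_findQuotePosition_py; infer_instance

def pvWitness_findQuotePosition_py : String := "a'b'c\"d\""

def Spec_findQuotePosition_py (text : String) (out : List (Int × Int)) : Prop := out = findQuotePosition_py_alt text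
instance (text : String) (out : List (Int × Int)) : Decidable (Spec_findQuotePosition_py text out) := by unfold Spec_findQuotePosition_py; infer_instance

-- ===== CLAIM (what is proved, stated in full; the proofs are below) =====
def Claim_equal_findQuotePosition_py : Prop := ∀ (text : String), Dom_findQuotePosition_py text → Pre_findQuotePosition_py text → Spec_findQuotePosition_py text (findQuotePosition_py text)

-- ===== LEMMAS AND PROOFS =====

theorem single_prefix_drop (cs : List Char) (q : Char) (i : Nat) :
    ([q] <+: cs.drop i) ↔ cs[i]? = some q := by
  rw [← List.head?_drop]
  cases h : cs.drop i with
  | nil => simp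
  | cons a l => simp [List.cons_prefix_cons, eq_comm]

theorem findFrom_oob (cs : List Char) (q : Char) (k : Nat) (h : cs.length ≤ k) :
    PySem.Chars.findFrom cs [q] (k:Int) none = -1 := by
  simp [PySem.Chars.findFrom]
  intro h1 h2
  exfalso
  have hk : k = cs.length := by omega
  subst hk
  have hnn : ¬((cs.length:Int) < 0) := by omega
  simp [hnn] at h2
  rw [PySem.Chars.find_eq_neg_one_iff] at h2
  simp at h2

theorem pvFindFromBounds (cs : List Char) (q : Char) (k : Nat)
    (h : PySem.Chars.findFrom cs [q] (k:Int) none ≠ -1) :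
    (k:Int) ≤ PySem.Chars.findFrom cs [q] (k:Int) none ∧
      (PySem.Chars.findFrom cs [q] (k:Int) none).toNat < cs.length := by
  have hk : k ≤ cs.length := by
    by_contra hgt
    exact h (findFrom_oob cs q k (by omega))
  obtain ⟨h1, h2, -⟩ := PySem.Chars.findFrom_natCast_spec cs [q] k hk h
  refine ⟨h1, ?_⟩
  rw [single_prefix_drop] at h2
  exact (List.getElem?_eq_some_iff.mp h2).1

theorem findFrom_step (cs : List Char) (q : Char) (k : Nat) (hk : k < cs.length) :
    PySem.Chars.findFrom cs [q] (k:Int) none =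
      if cs[k] = q then ((k:Nat):Int) else PySem.Chars.findFrom cs [q] ((k+1:Nat):Int) none := by
  have hmem : ∀ m, m ≤ cs.length →
      (PySem.Chars.findFrom cs [q] (m:Int) none = -1 ↔ ¬ q ∈ cs.drop m) := by
    intro m hm
    rw [PySem.Chars.findFrom_natCast_eq_neg_one_iff cs [q] m hm, List.singleton_infix_iff]
  have hdrop : cs.drop k = cs[k] :: cs.drop (k+1) := List.drop_eq_getElem_cons hk
  by_cases hc : cs[k] = q
  · rw [if_pos hc]
    have hpre : [q] <+: cs.drop k := by
      rw [single_prefix_drop]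
      simp [List.getElem?_eq_getElem hk, hc]
    have hne : PySem.Chars.findFrom cs [q] (k:Int) none ≠ -1 := by
      intro hEq
      rw [hmem k (by omega)] at hEq
      exact hEq (by rw [hdrop]; simp [hc])
    obtain ⟨h1, h2, h3⟩ := PySem.Chars.findFrom_natCast_spec cs [q] k (by omega) hne
    by_cases hlt : k < (PySem.Chars.findFrom cs [q] (k:Int) none).toNat
    · exact absurd hpre (h3 k le_rfl hlt)
    · omega
  · rw [if_neg hc]
    by_cases h' : PySem.Chars.findFrom cs [q] ((k+1:Nat):Int) none = -1
    · rw [h']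
      rw [hmem k (by omega)]
      rw [hmem (k+1) (by omega)] at h'
      rw [hdrop]
      simp only [List.mem_cons, not_or]
      exact ⟨fun he => hc he.symm, h'⟩
    · have hne : PySem.Chars.findFrom cs [q] (k:Int) none ≠ -1 := by
        intro hEq
        rw [hmem k (by omega)] at hEq
        rw [hmem (k+1) (by omega)] at h'
        push Not at h'
        exact hEq (by rw [hdrop]; exact List.mem_cons_of_mem _ h')
      obtain ⟨h1, h2, h3⟩ := PySem.Chars.findFrom_natCast_spec cs [q] k (by omega) hne
      obtain ⟨h1', h2', h3'⟩ := PySem.Chars.findFrom_natCast_spec cs [q] (k+1) (by omega) h'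
      set F := PySem.Chars.findFrom cs [q] (k:Int) none with hF
      set F' := PySem.Chars.findFrom cs [q] ((k+1:Nat):Int) none with hF'
      have hFk : F.toNat ≠ k := by
        intro he
        rw [he, single_prefix_drop, List.getElem?_eq_getElem hk] at h2
        exact hc (by simpa using h2)
      have e1 : ¬ F.toNat < F'.toNat := fun hlt => absurd h2 (h3' F.toNat (by omega) hlt)
      have e2 : ¬ F'.toNat < F.toNat := fun hlt => absurd h2' (h3 F'.toNat (by omega) hlt)
      omega

-- with enough fuel, findCloseB does not depend on the fuel
theorem findCloseB_fuel (cs : List Char) (q : Char) :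
    ∀ f1 f2 k, k ≤ cs.length → cs.length + 1 - k ≤ f1 → cs.length + 1 - k ≤ f2 →
      findCloseB cs q f1 k = findCloseB cs q f2 k := by
  intro f1
  induction f1 with
  | zero => intro f2 k hk h1 h2; omega
  | succ f1 ih =>
      intro f2 k hk h1 h2
      obtain ⟨f2', rfl⟩ : ∃ f2', f2 = f2' + 1 := ⟨f2 - 1, by omega⟩
      simp only [findCloseB]
      by_cases hj : PySem.Chars.findFrom cs [q] (k:Int) none = -1
      · rw [if_pos hj, if_pos hj]
      · rw [if_neg hj, if_neg hj]
        have hb := pvFindFromBounds cs q k hj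
        by_cases hbs : PySem.List.pyGet? cs (PySem.Chars.findFrom cs [q] (k:Int) none - 1) = some '\\'
        · rw [if_pos hbs, if_pos hbs]
          exact ih f2' _ (by omega) (by omega) (by omega)
        · rw [if_neg hbs, if_neg hbs]

theorem findCloseB_ge (cs : List Char) (q : Char) :
    ∀ f k j, findCloseB cs q f k = some j → k ≤ j ∧ j < cs.length := by
  intro f
  induction f with
  | zero => intro k j h; simp [findCloseB] at h
  | succ f ih =>
      intro k j h
      simp only [findCloseB] at h
      by_cases hj : PySem.Chars.findFrom cs [q] (k:Int) none = -1
      · rw [if_pos hj] at h; simp at h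
      · rw [if_neg hj] at h
        have hb := pvFindFromBounds cs q k hj
        by_cases hbs : PySem.List.pyGet? cs (PySem.Chars.findFrom cs [q] (k:Int) none - 1) = some '\\'
        · rw [if_pos hbs] at h
          have := ih _ j h
          omega
        · rw [if_neg hbs] at h
          simp only [Option.some.injEq] at h
          omega

theorem findCloseB_oob (cs : List Char) (q : Char) (f k : Nat) (h : cs.length ≤ k) :
    findCloseB cs q f k = none := by
  cases f with
  | zero => rfl
  | succ f => simp only [findCloseB]; rw [if_pos (findFrom_oob cs q k h)]

theorem findCloseB_step_skip (cs : List Char) (q : Char) (f k : Nat) (hk : k < cs.length)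
    (hq : cs[k] ≠ q) : findCloseB cs q (f+1) k = findCloseB cs q (f+1) (k+1) := by
  conv_lhs => simp only [findCloseB]
  conv_rhs => simp only [findCloseB]
  rw [findFrom_step cs q k hk, if_neg hq]

theorem findCloseB_step_close (cs : List Char) (q : Char) (f k : Nat) (hk : k < cs.length)
    (hq : cs[k] = q) :
    findCloseB cs q (f+1) k =
      if PySem.List.pyGet? cs ((k:Int) - 1) = some '\\' then findCloseB cs q f (k+1)
      else some k := by
  conv_lhs => simp only [findCloseB]
  rw [findFrom_step cs q k hk, if_pos hq]
  have hne : ¬ ((k:Nat):Int) = -1 := by omega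
  rw [if_neg hne, Int.toNat_natCast]

-- A's fold, started in the open state (q, lp) at index k ≥ 1, runs exactly B's inner loop
theorem open_lemma (cs : List Char) (q : Char) (lp : Int) :
    ∀ f k (acc : List (Int × Int)), cs.length + 1 - k ≤ f → 1 ≤ k →
    (PySem.List.enumerate (cs.drop k) (k:Int)).foldl (stepA cs) (acc, some (q, lp)) =
      (match findCloseB cs q f k with
       | none => (acc, some (q, lp))
       | some j => (PySem.List.enumerate (cs.drop (j+1)) ((j+1:Nat):Int)).foldl (stepA cs)
           (acc ++ [(lp, (j:Int))], none)) := by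
  intro f
  induction f with
  | zero =>
      intro k acc hf hk1
      have hle : cs.length ≤ k := by omega
      rw [List.drop_eq_nil_of_le hle]
      simp [PySem.List.enumerate, findCloseB]
  | succ f ih =>
      intro k acc hf hk1
      by_cases hklt : k < cs.length
      · have hdrop : cs.drop k = cs[k] :: cs.drop (k+1) := List.drop_eq_getElem_cons hklt
        rw [hdrop, PySem.List.enumerate_cons, List.foldl_cons]
        have hcast : (k:Int) + 1 = ((k+1:Nat):Int) := by push_cast; ring
        rw [hcast]
        by_cases hc : cs[k] = q
        · by_cases hb : PySem.List.pyGet? cs ((k:Int) - 1) = some '\\'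
          · have hstep : stepA cs (acc, some (q, lp)) ((k:Int), cs[k]) = (acc, some (q, lp)) := by
              simp only [stepA]
              rw [if_neg]
              intro hand
              exact hand.2 hb
            rw [hstep, findCloseB_step_close cs q f k hklt hc, if_pos hb]
            exact ih (k+1) acc (by omega) (by omega)
          · have hstep : stepA cs (acc, some (q, lp)) ((k:Int), cs[k]) =
                (acc ++ [(lp, (k:Int))], none) := by
              simp only [stepA]
              rw [if_pos ⟨hc, hb⟩]
            rw [hstep, findCloseB_step_close cs q f k hklt hc, if_neg hb]
        · have hstep : stepA cs (acc, some (q, lp)) ((k:Int), cs[k]) = (acc, some (q, lp)) := by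
            simp only [stepA]
            rw [if_neg]
            intro hand
            exact hc hand.1
          rw [hstep, findCloseB_step_skip cs q f k hklt hc,
              findCloseB_fuel cs q (f+1) f (k+1) (by omega) (by omega) (by omega)]
          exact ih (k+1) acc (by omega) (by omega)
      · have hle : cs.length ≤ k := by omega
        rw [List.drop_eq_nil_of_le hle, findCloseB_oob cs q (f+1) k hle]
        simp [PySem.List.enumerate]

-- A's fold, started closed at index i, produces acc ++ B's outer loop from i
theorem closed_lemma (cs : List Char) :
    ∀ f i (acc : List (Int × Int)), cs.length + 1 - i ≤ f →
    ((PySem.List.enumerate (cs.drop i) (i:Int)).foldl (stepA cs) (acc, none)).1 =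
      acc ++ loopB cs f i := by
  intro f
  induction f with
  | zero =>
      intro i acc hf
      have hle : cs.length ≤ i := by omega
      rw [List.drop_eq_nil_of_le hle]
      simp [PySem.List.enumerate, loopB]
  | succ f ih =>
      intro i acc hf
      by_cases hilt : i < cs.length
      · have hdrop : cs.drop i = cs[i] :: cs.drop (i+1) := List.drop_eq_getElem_cons hilt
        rw [hdrop, PySem.List.enumerate_cons, List.foldl_cons]
        have hcast : (i:Int) + 1 = ((i+1:Nat):Int) := by push_cast; ring
        rw [hcast]
        by_cases hq : cs[i] = '\'' ∨ cs[i] = '"'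
        · have hstep : stepA cs (acc, none) ((i:Int), cs[i]) = (acc, some (cs[i], (i:Int))) := by
            simp only [stepA]
            rw [if_pos hq]
          rw [hstep,
              open_lemma cs cs[i] (i:Int) (cs.length + 1) (i+1) acc (by omega) (by omega)]
          conv_rhs => simp only [loopB]
          rw [dif_pos hilt, if_pos hq]
          cases hm : findCloseB cs cs[i] (cs.length + 1) (i+1) with
          | none => simp
          | some j =>
              have hj := findCloseB_ge cs cs[i] (cs.length + 1) (i+1) j hm
              rw [ih (j+1) (acc ++ [((i:Int), (j:Int))]) (by omega)]
              simp
        · have hstep : stepA cs (acc, none) ((i:Int), cs[i]) = (acc, none) := by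
            simp only [stepA]
            rw [if_neg hq]
          rw [hstep, ih (i+1) acc (by omega)]
          conv_rhs => simp only [loopB]
          rw [dif_pos hilt, if_neg hq]
      · have hle : cs.length ≤ i := by omega
        rw [List.drop_eq_nil_of_le hle]
        conv_rhs => simp only [loopB]
        rw [dif_neg (by omega : ¬ i < cs.length)]
        simp [PySem.List.enumerate]

-- ===== VERDICT (by name: the statement is the Claim_ definition above) =====
theorem findQuotePosition_py_spec : Claim_equal_findQuotePosition_py := by
  intro text _ _
  unfold Spec_findQuotePosition_py findQuotePosition_py findQuotePosition_py_alt
  have h := closed_lemma text.toList (text.toList.length + 1) 0 [] (by omega)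
  simpa using h
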